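-- pv_equiv track=rewrite | github.com/1160300506/trubo_hom | turbo_hom/demo.py | transform_df
-- ===== SOURCE A (Python) =====
-- def transform_df(vs, bf):
--     df = []
--     visited = []
--     stack = [vs]
--     visited.append(vs)
--
--     while len(stack):
--         q = stack[-1]
--         flag = 0
--         for i in range(len(bf)):
--             if bf[i][0] == q and bf[i][1] not in visited:
--                 visited.append(bf[i][1])
--                 stack.append(bf[i][1])
--                 df.append([q, bf[i][1]])
--                 flag = 1
--                 break
--         if flag == 0:
--             stack.pop()
--     return df
-- ===== SOURCE B (Python) =====
-- def transform_df(vs, bf):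
--     # Build adjacency lists once, then iterative DFS with an explicit
--     # (node, remaining-neighbours) stack instead of rescanning the whole
--     # edge list at every step.
--     adj = {}
--     for u, v, *_ in bf:
--         adj.setdefault(u, []).append(v)
--     visited = {vs}
--     df = []
--     stack = [(vs, adj.get(vs, []))]
--     while stack:
--         q, ns = stack[-1]
--         i = 0
--         while i < len(ns) and ns[i] in visited:
--             i += 1
--         if i == len(ns):
--             stack.pop()
--         else:
--             w = ns[i]
--             stack[-1] = (q, ns[i + 1:])
--             visited.add(w)
--             df.append([q, w])
--             stack.append((w, adj.get(w, [])))
--     return df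
-- ===== Notes on version B (the rewrite author's own statement) =====
-- stated objective: alternative
-- what changed: Replaces A's rescan of the entire edge list at every DFS step by an adjacency dictionary built in one pass plus a per-node remaining-neighbour list on the stack (the standard iterative DFS); avoids the repeated edge-list scans, though a timing run's inputs showed no measured speed-up.
-- outside the precondition, e.g. on transform_df(0, [[5]]): A returns [], B raises ValueError
import Mathlib
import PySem

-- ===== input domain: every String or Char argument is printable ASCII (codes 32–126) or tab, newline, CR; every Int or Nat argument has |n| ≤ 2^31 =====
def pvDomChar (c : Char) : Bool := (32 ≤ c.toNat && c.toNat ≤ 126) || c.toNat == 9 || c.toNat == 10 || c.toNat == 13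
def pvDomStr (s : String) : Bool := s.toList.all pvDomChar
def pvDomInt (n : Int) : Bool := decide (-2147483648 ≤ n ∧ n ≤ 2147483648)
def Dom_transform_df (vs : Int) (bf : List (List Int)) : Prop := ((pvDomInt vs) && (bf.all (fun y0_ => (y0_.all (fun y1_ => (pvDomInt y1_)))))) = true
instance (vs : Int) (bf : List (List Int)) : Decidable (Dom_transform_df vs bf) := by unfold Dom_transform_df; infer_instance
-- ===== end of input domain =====

-- B replaces A's full rescan of the edge list at every DFS step by a one-pass
-- adjacency dictionary plus a per-node remaining-neighbour list (objective: alternative).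

-- ===== PORT A =====
-- bf[i][0] / bf[i][1]; exact under Pre_ (every edge has length ≥ 2)
def pvFst (e : List Int) : Int := e.getD 0 0
def pvSnd (e : List Int) : Int := e.getD 1 0

-- A's inner for-loop with break: first edge from q whose target is unvisited
def findA (bf : List (List Int)) (q : Int) (visited : List Int) : Option Int :=
  match bf with
  | [] => none
  | e :: rest =>
    if pvFst e = q ∧ pvSnd e ∉ visited then some (pvSnd e) else findA rest q visited

-- A's while loop; fuel 2*len(bf)+1 bounds its iteration count (≤ pushes + pops)
def loopA (bf : List (List Int)) : Nat → List (List Int) → List Int → List Int → List (List Int)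
  | 0, df, _, _ => df
  | _ + 1, df, _, [] => df
  | n + 1, df, visited, q :: rest =>
    match findA bf q visited with
    | some w => loopA bf n (df ++ [[q, w]]) (visited ++ [w]) (w :: q :: rest)
    | none => loopA bf n df visited rest

def transform_df (vs : Int) (bf : List (List Int)) : List (List Int) :=
  loopA bf (2 * bf.length + 1) [] [vs] [vs]

-- ===== PORT B =====
-- for u, v, *_ in bf: adj.setdefault(u, []).append(v)
def buildAdj (bf : List (List Int)) : PySem.Dict Int (List Int) :=
  (bf.map (fun e => (pvFst e, pvSnd e))).foldl
    (fun d p => d.modify p.1 [] (· ++ [p.2])) PySem.Dict.empty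

-- B's inner while: advance past already-visited neighbours, return the suffix ns[i:]
def skipVis (visited : PySem.Set Int) : List Int → List Int
  | [] => []
  | w :: ns => if w ∈ visited then skipVis visited ns else w :: ns

-- B's while loop over the (node, remaining-neighbours) stack; same fuel bound
def loopB (adj : PySem.Dict Int (List Int)) :
    Nat → List (List Int) → PySem.Set Int → List (Int × List Int) → List (List Int)
  | 0, df, _, _ => df
  | _ + 1, df, _, [] => df
  | n + 1, df, visited, (q, ns) :: rest =>
    match skipVis visited ns with
    | [] => loopB adj n df visited rest
    | w :: ns' =>
      loopB adj n (df ++ [[q, w]]) (PySem.Set.add visited w)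
        ((w, adj.getD w []) :: (q, ns') :: rest)

def transform_df_alt (vs : Int) (bf : List (List Int)) : List (List Int) :=
  let adj := buildAdj bf
  loopB adj (2 * bf.length + 1) [] (PySem.Set.ofList [vs]) [(vs, adj.getD vs [])]

-- ===== PRECONDITION & SPEC =====
-- Pre_ excludes edge lists containing an edge of length < 2: on those A raises
-- IndexError whenever the short edge's head is scanned as a match (and B raises
-- ValueError unpacking it); a short edge whose head is unreachable lets A return,
-- but such inputs are excluded too since reachability is not closed-form.
def Pre_transform_df (vs : Int) (bf : List (List Int)) : Prop :=
  ∀ e ∈ bf, 2 ≤ e.length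
instance (vs : Int) (bf : List (List Int)) : Decidable (Pre_transform_df vs bf) := by
  unfold Pre_transform_df; infer_instance

def pvWitness_transform_df : Int × List (List Int) := (0, [[0, 1], [1, 2], [0, 2]])

def Spec_transform_df (vs : Int) (bf : List (List Int)) (out : List (List Int)) : Prop :=
  out = transform_df_alt vs bf
instance (vs : Int) (bf : List (List Int)) (out : List (List Int)) :
    Decidable (Spec_transform_df vs bf out) := by unfold Spec_transform_df; infer_instance

-- ===== CLAIM (what is proved, stated in full; the proofs are below) =====
def Claim_equal_transform_df : Prop :=
  ∀ (vs : Int) (bf : List (List Int)), Dom_transform_df vs bf →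
    Pre_transform_df vs bf → Spec_transform_df vs bf (transform_df vs bf)

-- ===== LEMMAS AND PROOFS =====

-- neighbours of q in bf order (what adj[q] holds after the build loop)
def adjT (bf : List (List Int)) (q : Int) : List Int :=
  ((bf.map (fun e => (pvFst e, pvSnd e))).filter (fun p => p.1 == q)).map Prod.snd

lemma buildAdj_getD (bf : List (List Int)) (q : Int) :
    (buildAdj bf).getD q [] = adjT bf q := by
  simp [buildAdj, adjT, PySem.Dict.getD_foldl_modify_append, PySem.Dict.getD_empty]

lemma skipVis_append (v : PySem.Set Int) (pre ns : List Int)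
    (h : ∀ x ∈ pre, x ∈ v) : skipVis v (pre ++ ns) = skipVis v ns := by
  induction pre with
  | nil => rfl
  | cons a pre ih =>
    simp only [List.cons_append, skipVis, if_pos (h a (by simp))]
    exact ih (fun x hx => h x (by simp [hx]))

lemma skipVis_decomp (v : PySem.Set Int) (ns : List Int) :
    ∃ pre, ns = pre ++ skipVis v ns ∧ ∀ x ∈ pre, x ∈ v := by
  induction ns with
  | nil => exact ⟨[], rfl, by simp⟩
  | cons a ns ih =>
    by_cases h : a ∈ v
    · obtain ⟨pre, hpre, hmem⟩ := ih
      refine ⟨a :: pre, by simpa [skipVis, h] using hpre, ?_⟩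
      intro x hx
      rcases List.mem_cons.mp hx with hx | hx
      · exact hx ▸ h
      · exact hmem x hx
    · exact ⟨[], by simp [skipVis, h], by simp⟩

lemma skipVis_head_not_mem (v : PySem.Set Int) (ns : List Int) (w : Int) (ns' : List Int)
    (h : skipVis v ns = w :: ns') : w ∉ v := by
  induction ns with
  | nil => simp [skipVis] at h
  | cons a ns ih =>
    by_cases ha : a ∈ v
    · exact ih (by simpa [skipVis, ha] using h)
    · simp only [skipVis, if_neg ha, List.cons.injEq] at h
      exact h.1 ▸ ha

lemma findA_eq_skip (bf : List (List Int)) (q : Int) (v : List Int) :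
    findA bf q v = (skipVis v (adjT bf q)).head? := by
  induction bf with
  | nil => rfl
  | cons e rest ih =>
    by_cases hq : pvFst e = q
    · by_cases hv : pvSnd e ∈ v
      · simpa [findA, adjT, hq, skipVis, hv, adjT] using by
          simpa [adjT] using ih
      · simp [findA, adjT, hq, skipVis, hv]
    · simpa [findA, adjT, hq] using ih

lemma set_add_of_not_mem (v : PySem.Set Int) (w : Int) (h : w ∉ v) :
    PySem.Set.add v w = v ++ [w] := by
  simp [PySem.Set.add, PySem.Set.contains, h]

-- lockstep equivalence of the two while loops under the stack invariant
lemma loop_eq (bf : List (List Int)) :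
    ∀ (n : Nat) (df : List (List Int)) (visited : List Int)
      (sB : List (Int × List Int)),
      (∀ p ∈ sB, ∃ pre, adjT bf p.1 = pre ++ p.2 ∧ ∀ x ∈ pre, x ∈ visited) →
      loopA bf n df visited (sB.map Prod.fst) = loopB (buildAdj bf) n df visited sB := by
  intro n
  induction n with
  | zero => intro df visited sB _; rfl
  | succ n ih =>
    intro df visited sB hinv
    match sB with
    | [] => rfl
    | (q, ns) :: rest =>
      obtain ⟨pre, hpre, hmem⟩ := hinv (q, ns) (by simp)
      have hfind : findA bf q visited = (skipVis visited ns).head? := by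
        rw [findA_eq_skip, hpre, skipVis_append visited pre ns hmem]
      cases hskip : skipVis visited ns with
      | nil =>
        rw [hskip] at hfind
        simp only [List.map_cons, loopA, loopB, hfind, hskip]
        exact ih df visited rest (fun p hp => hinv p (by simp [hp]))
      | cons w ns' =>
        rw [hskip] at hfind
        have hw : w ∉ visited := skipVis_head_not_mem visited ns w ns' hskip
        obtain ⟨skipped, hs, hsmem⟩ := skipVis_decomp visited ns
        rw [hskip] at hs
        simp only [List.map_cons, loopA, loopB, hfind, hskip,
          set_add_of_not_mem visited w hw]
        have := ih (df ++ [[q, w]]) (visited ++ [w])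
          ((w, (buildAdj bf).getD w []) :: (q, ns') :: rest) ?_
        · simpa using this
        · intro p hp
          rcases List.mem_cons.mp hp with hp | hp
          · subst hp
            exact ⟨[], by simp [buildAdj_getD], by simp⟩
          rcases List.mem_cons.mp hp with hp | hp
          · subst hp
            refine ⟨pre ++ skipped ++ [w], ?_, ?_⟩
            · rw [hpre, hs]; simp
            · intro x hx
              simp only [List.mem_append, List.mem_singleton] at hx
              rcases hx with (hx | hx) | hx
              · exact List.mem_append_left _ (hmem x hx)
              · exact List.mem_append_left _ (hsmem x hx)
              · simp [hx]
          · obtain ⟨pre', h1, h2⟩ := hinv p (by simp [hp])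
            exact ⟨pre', h1, fun x hx => List.mem_append_left _ (h2 x hx)⟩

-- ===== VERDICT (by name: the statement is the Claim_ definition above) =====
theorem transform_df_spec : Claim_equal_transform_df := by
  intro vs bf _ _
  unfold Spec_transform_df transform_df transform_df_alt
  have h := loop_eq bf (2 * bf.length + 1) [] [vs] [(vs, (buildAdj bf).getD vs [])]
    (by intro p hp; simp only [List.mem_singleton] at hp; subst hp
        exact ⟨[], by simp [buildAdj_getD], by simp⟩)
  simpa [PySem.Set.ofList] using h
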